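-- pv_equiv track=rewrite | github.com/Fondamenti18/fondamenti-di-programmazione | students/792515/homework04/program01.py | genera_sopra_albero
-- ===== SOURCE A (Python) =====
-- def genera_sopra_albero(x,dz):
--     if not x in dz.keys():
--         return dz
--     else:
--         lsrimuovere=dz[x]
--         del(dz[x])
--         for elemento in lsrimuovere:
--             genera_sopra_albero(elemento,dz)
--     return dz
-- ===== SOURCE B (Python) =====
-- def genera_sopra_albero(x, dz):
--     # Iterative DFS with an explicit stack instead of recursion; same in-place mutation of dz.
--     stack = [x]
--     while stack:
--         node = stack.pop()
--         if node in dz: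
--             children = dz[node]
--             del dz[node]
--             stack.extend(reversed(children))
--     return dz
-- ===== Notes on version B (the rewrite author's own statement) =====
-- stated objective: alternative
-- what changed: Replaces the self-recursive deletion with an iterative depth-first traversal using an explicit stack (pop a node, delete it, push its children reversed), removing recursion entirely.
import Mathlib
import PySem

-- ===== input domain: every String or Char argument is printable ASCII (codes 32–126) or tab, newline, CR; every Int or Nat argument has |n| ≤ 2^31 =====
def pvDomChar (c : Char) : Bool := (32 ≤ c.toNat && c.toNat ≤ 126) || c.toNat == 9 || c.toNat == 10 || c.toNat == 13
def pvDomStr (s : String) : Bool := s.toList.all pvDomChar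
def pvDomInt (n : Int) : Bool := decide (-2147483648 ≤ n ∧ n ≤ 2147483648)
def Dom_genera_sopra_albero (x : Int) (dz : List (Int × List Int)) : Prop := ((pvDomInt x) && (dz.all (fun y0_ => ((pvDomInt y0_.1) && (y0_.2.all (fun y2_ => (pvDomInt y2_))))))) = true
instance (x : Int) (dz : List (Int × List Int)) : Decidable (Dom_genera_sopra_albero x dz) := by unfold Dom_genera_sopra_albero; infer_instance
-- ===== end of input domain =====

-- B replaces A's recursion with an explicit-stack iterative DFS (different decomposition, same cost).
-- Both Pythons mutate dz in place identically; the equivalence proved here is about the returned dict.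

-- ===== PORT A =====
-- Python dict[int, list[int]] as association list; 'x in dz' / 'dz[x]' = first-match lookup.
def pvLookup (k : Int) : List (Int × List Int) → Option (List Int)
  | [] => none
  | (a, b) :: t => if a == k then some b else pvLookup k t

-- 'del dz[x]' : remove the first pair with key x.
def pvDel (k : Int) : List (Int × List Int) → List (Int × List Int)
  | [] => []
  | (a, b) :: t => if a == k then t else (a, b) :: pvDel k t

-- termination fact for the ports: a successful deletion strictly shrinks the dict
theorem pvDel_length_lt (k : Int) (l : List (Int × List Int)) (ls : List Int)
    (h : pvLookup k l = some ls) : (pvDel k l).length < l.length := by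
  induction l with
  | nil => simp [pvLookup] at h
  | cons p t ih =>
    obtain ⟨a, b⟩ := p
    by_cases hk : a == k
    · simp [pvDel, hk]
    · simp [pvLookup, hk] at h
      simp only [pvDel, hk, List.length_cons]
      exact Nat.succ_lt_succ (ih h)

-- A's recursion, made total by a fuel argument (fuel = dz.length + 1 always suffices:
-- every recursive level first deletes a key, so depth never exceeds the dict size).
def generaFuel : Nat → Int → List (Int × List Int) → List (Int × List Int)
  | 0, _, dz => dz
  | f + 1, x, dz =>
    match pvLookup x dz with
    | none => dz                                   -- if not x in dz.keys(): return dz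
    | some lsrimuovere =>                          -- lsrimuovere = dz[x]
        lsrimuovere.foldl (fun d elemento => generaFuel f elemento d) (pvDel x dz)
                                                   -- del dz[x]; for elemento in lsrimuovere: recurse

def genera_sopra_albero (x : Int) (dz : List (Int × List Int)) : List (Int × List Int) :=
  generaFuel (dz.length + 1) x dz

-- ===== PORT B =====
-- Source B's stack is a Python list popped from the end and extended with reversed(children);
-- it is modelled here with the TOP AT THE HEAD, so pop() = take the head and
-- extend(reversed(children)) = children ++ stack (exact same pop order as the Python).
def loopB : List Int → List (Int × List Int) → List (Int × List Int)
  | [], dz => dz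
  | node :: rest, dz =>
    match h : pvLookup node dz with
    | none => loopB rest dz
    | some children => loopB (children ++ rest) (pvDel node dz)
termination_by stack dz => (dz.length, stack.length)
decreasing_by
  · exact Prod.Lex.right _ (Nat.lt_succ_self _)
  · exact Prod.Lex.left _ _ (pvDel_length_lt _ _ _ h)

def genera_sopra_albero_alt (x : Int) (dz : List (Int × List Int)) : List (Int × List Int) :=
  loopB [x] dz

-- ===== PRECONDITION & SPEC =====
def Spec_genera_sopra_albero (x : Int) (dz : List (Int × List Int)) (out : List (Int × List Int)) : Prop := out = genera_sopra_albero_alt x dz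
instance (x : Int) (dz : List (Int × List Int)) (out : List (Int × List Int)) : Decidable (Spec_genera_sopra_albero x dz out) := by unfold Spec_genera_sopra_albero; infer_instance

-- ===== CLAIM (what is proved, stated in full; the proofs are below) =====
def Claim_equal_genera_sopra_albero : Prop := ∀ (x : Int) (dz : List (Int × List Int)), Dom_genera_sopra_albero x dz → Spec_genera_sopra_albero x dz (genera_sopra_albero x dz)

-- ===== LEMMAS AND PROOFS =====

-- processing never grows the dict
theorem loopB_length_le (stack : List Int) (dz : List (Int × List Int)) :
    (loopB stack dz).length ≤ dz.length := by
  induction stack, dz using loopB.induct with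
  | case1 dz => simp [loopB]
  | case2 node rest dz h ih => rw [loopB, h]; exact ih
  | case3 node rest dz children h ih =>
      rw [loopB, h]
      exact le_of_lt (lt_of_le_of_lt ih (pvDel_length_lt _ _ _ h))

-- the stack is processed left to right: a suffix waits until the prefix's work is done
theorem loopB_append (s1 s2 : List Int) (dz : List (Int × List Int)) :
    loopB (s1 ++ s2) dz = loopB s2 (loopB s1 dz) := by
  induction s1, dz using loopB.induct generalizing s2 with
  | case1 dz => simp [loopB]
  | case2 node rest dz h ih =>
      rw [List.cons_append, loopB, h, loopB, h, ih]
  | case3 node rest dz children h ih =>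
      rw [List.cons_append, loopB, h, loopB, h]
      dsimp only
      rw [← List.append_assoc, ih]

-- core: with enough fuel, A's recursion computes exactly B's stack loop
theorem generaFuel_eq_loopB (f : Nat) :
    ∀ (x : Int) (dz : List (Int × List Int)), dz.length < f →
      generaFuel f x dz = loopB [x] dz := by
  induction f with
  | zero => intro x dz h; omega
  | succ f ih =>
    have aux : ∀ (ls : List Int) (d : List (Int × List Int)), d.length < f →
        ls.foldl (fun d e => generaFuel f e d) d = loopB ls d := by
      intro ls
      induction ls with
      | nil => intro d hd; simp [loopB]
      | cons e rest ihr =>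
        intro d hd
        have h1 := ih e d hd
        have h2 : (loopB [e] d).length ≤ d.length := loopB_length_le _ _
        simp only [List.foldl_cons]
        rw [h1, ihr _ (lt_of_le_of_lt h2 hd), ← loopB_append, List.singleton_append]
    intro x dz h
    rw [generaFuel]
    cases hl : pvLookup x dz with
    | none => rw [loopB, hl, loopB]
    | some ls =>
      have hdel : (pvDel x dz).length < f := by
        have := pvDel_length_lt x dz ls hl; omega
      dsimp only
      rw [aux ls _ hdel, loopB, hl]
      dsimp only
      rw [List.append_nil]

-- ===== VERDICT (by name: the statement is the Claim_ definition above) =====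
theorem genera_sopra_albero_spec : Claim_equal_genera_sopra_albero := by
  intro x dz _
  unfold Spec_genera_sopra_albero genera_sopra_albero genera_sopra_albero_alt
  exact generaFuel_eq_loopB (dz.length + 1) x dz (Nat.lt_succ_self _)
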